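-- pv_equiv track=rewrite | github.com/danielakuinchtner/cp-mdp | src/cp-mdp/utils/tensor_components.py | succ_tuple
-- ===== SOURCE A (Python) =====
-- import math
--
-- def succ_tuple(a, state_tuple, final_limits):
--     successor = []
--     for dim in range(len(state_tuple)):
--
--         if a - math.ceil(a / 2) == dim:
--             if a % 2 == 0:
--                 if state_tuple[dim] != 0:
--                     d = state_tuple[dim] - 1
--                 else:
--                     d = state_tuple[dim]
--             else:
--                 if state_tuple[dim] != final_limits[dim]:
--                     d = state_tuple[dim] + 1
--                 else:
--                     d = state_tuple[dim]
--         else: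
--             d = state_tuple[dim]
--
--         successor.append(d)
--
--     return successor
-- ===== SOURCE B (Python) =====
-- import math
--
-- def succ_tuple(a, state_tuple, final_limits):
--     # Copy once, compute the single affected dimension, patch it in place.
--     successor = list(state_tuple)
--     target = a - math.ceil(a / 2)
--     if 0 <= target < len(successor):
--         cur = successor[target]
--         if a % 2 == 0:
--             if cur != 0:
--                 successor[target] = cur - 1
--         else:
--             if cur != final_limits[target]:
--                 successor[target] = cur + 1
--     return successor
-- ===== Notes on version B (the rewrite author's own statement) =====
-- stated objective: simpler
-- what changed: Replaces the per-dimension loop with per-element branching by a single copy of the input plus one guarded in-place update at the one computed target index.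
import Mathlib
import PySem

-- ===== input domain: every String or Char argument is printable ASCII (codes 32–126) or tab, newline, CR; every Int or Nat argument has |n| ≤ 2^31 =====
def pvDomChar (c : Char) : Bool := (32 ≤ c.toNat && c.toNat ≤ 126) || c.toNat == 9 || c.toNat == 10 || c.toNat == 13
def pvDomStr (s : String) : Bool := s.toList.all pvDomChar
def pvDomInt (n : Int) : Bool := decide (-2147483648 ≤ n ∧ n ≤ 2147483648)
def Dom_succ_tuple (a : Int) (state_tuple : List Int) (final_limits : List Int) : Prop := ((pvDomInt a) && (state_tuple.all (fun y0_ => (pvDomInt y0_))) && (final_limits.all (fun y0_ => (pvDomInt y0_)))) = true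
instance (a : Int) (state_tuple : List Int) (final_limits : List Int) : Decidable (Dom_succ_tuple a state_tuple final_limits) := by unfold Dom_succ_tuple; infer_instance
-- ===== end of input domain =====

-- B replaces the per-dimension loop by one copy plus a single guarded update at the computed target index (objective: simpler).
-- math.ceil(a / 2) is ported as -((-a) // 2), exact on Dom (|a| ≤ 2^31, so the float division is exact).

-- ===== PORT A =====
def succ_tuple (a : Int) (state_tuple : List Int) (final_limits : List Int) : List Int :=
  (List.range state_tuple.length).foldl (fun (successor : List Int) (dim : Nat) =>
    let d : Int :=
      if a - (-(PySem.Int.floordiv (-a) 2)) = (dim : Int) then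
        if PySem.Int.mod a 2 = 0 then
          if PySem.List.pyGetD state_tuple (dim : Int) 0 ≠ 0 then
            PySem.List.pyGetD state_tuple (dim : Int) 0 - 1
          else
            PySem.List.pyGetD state_tuple (dim : Int) 0
        else
          if PySem.List.pyGetD state_tuple (dim : Int) 0 ≠ PySem.List.pyGetD final_limits (dim : Int) 0 then
            PySem.List.pyGetD state_tuple (dim : Int) 0 + 1
          else
            PySem.List.pyGetD state_tuple (dim : Int) 0
      else
        PySem.List.pyGetD state_tuple (dim : Int) 0
    successor ++ [d]) []

-- ===== PORT B =====
def succ_tuple_alt (a : Int) (state_tuple : List Int) (final_limits : List Int) : List Int :=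
  let successor := state_tuple
  let target := a - (-(PySem.Int.floordiv (-a) 2))
  if 0 ≤ target ∧ target < (successor.length : Int) then
    let cur := PySem.List.pyGetD successor target 0
    if PySem.Int.mod a 2 = 0 then
      if cur ≠ 0 then PySem.List.pySetD successor target (cur - 1) else successor
    else
      if cur ≠ PySem.List.pyGetD final_limits target 0 then PySem.List.pySetD successor target (cur + 1) else successor
  else successor

-- ===== PRECONDITION & SPEC =====
-- Pre_ excludes exactly the inputs where Python A raises IndexError: a odd with the target
-- dimension inside state_tuple but outside final_limits (B raises there too).
def Pre_succ_tuple (a : Int) (state_tuple : List Int) (final_limits : List Int) : Prop :=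
  (PySem.Int.mod a 2 ≠ 0 ∧ 0 ≤ a - (-(PySem.Int.floordiv (-a) 2)) ∧
      a - (-(PySem.Int.floordiv (-a) 2)) < (state_tuple.length : Int)) →
    a - (-(PySem.Int.floordiv (-a) 2)) < (final_limits.length : Int)
instance (a : Int) (state_tuple : List Int) (final_limits : List Int) : Decidable (Pre_succ_tuple a state_tuple final_limits) := by unfold Pre_succ_tuple; infer_instance
def pvWitness_succ_tuple : Int × List Int × List Int := (1, ([0, 0], [3, 3]))

def Spec_succ_tuple (a : Int) (state_tuple : List Int) (final_limits : List Int) (out : List Int) : Prop := out = succ_tuple_alt a state_tuple final_limits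
instance (a : Int) (state_tuple : List Int) (final_limits : List Int) (out : List Int) : Decidable (Spec_succ_tuple a state_tuple final_limits out) := by unfold Spec_succ_tuple; infer_instance

-- ===== CLAIM (what is proved, stated in full; the proofs are below) =====
def Claim_equal_succ_tuple : Prop := ∀ (a : Int) (state_tuple : List Int) (final_limits : List Int), Dom_succ_tuple a state_tuple final_limits → Pre_succ_tuple a state_tuple final_limits → Spec_succ_tuple a state_tuple final_limits (succ_tuple a state_tuple final_limits)

-- ===== LEMMAS AND PROOFS =====

-- Port A's loop as a map over the index range.
theorem succ_tuple_eq_map (a : Int) (st fl : List Int) :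
    succ_tuple a st fl = (List.range st.length).map (fun (dim : Nat) =>
      if a - (-(PySem.Int.floordiv (-a) 2)) = (dim : Int) then
        if PySem.Int.mod a 2 = 0 then
          if PySem.List.pyGetD st (dim : Int) 0 ≠ 0 then
            PySem.List.pyGetD st (dim : Int) 0 - 1
          else
            PySem.List.pyGetD st (dim : Int) 0
        else
          if PySem.List.pyGetD st (dim : Int) 0 ≠ PySem.List.pyGetD fl (dim : Int) 0 then
            PySem.List.pyGetD st (dim : Int) 0 + 1
          else
            PySem.List.pyGetD st (dim : Int) 0
      else
        PySem.List.pyGetD st (dim : Int) 0) := by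
  unfold succ_tuple
  rw [PySem.List.foldl_append_singleton_eq_map, List.nil_append]

-- Reading the whole list back by index gives the list itself.
theorem map_range_getD (xs : List Int) :
    (List.range xs.length).map (fun i => xs.getD i 0) = xs := by
  apply List.ext_getElem
  · simp
  · intro i h1 h2
    simp [List.getD_eq_getElem?_getD, h2]

theorem map_eq_self (st : List Int) (g : Nat → Int)
    (hg : ∀ dim, dim < st.length → g dim = st.getD dim 0) :
    (List.range st.length).map g = st := by
  rw [List.map_congr_left (fun dim h => hg dim (List.mem_range.mp h)), map_range_getD]

theorem map_eq_set (st : List Int) (t : Int) (h0 : 0 ≤ t) (_hl : t < (st.length : Int))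
    (g : Nat → Int) (v : Int)
    (hg : ∀ (dim : Nat), t = (dim : Int) → g dim = v)
    (hg' : ∀ (dim : Nat), ¬ t = (dim : Int) → g dim = st.getD dim 0) :
    (List.range st.length).map g = st.set t.toNat v := by
  apply List.ext_getElem
  · simp
  · intro i h1 h2
    have h2' : i < st.length := by simpa using h2
    simp only [List.getElem_map, List.getElem_range, List.getElem_set]
    by_cases hi : t = (i : Int)
    · have hti : t.toNat = i := by omega
      rw [hg i hi, if_pos hti]
    · have hti : ¬ t.toNat = i := by omega
      rw [hg' i hi, if_neg hti]
      simp [List.getD_eq_getElem?_getD, h2']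

theorem succ_tuple_spec : Claim_equal_succ_tuple := by
  intro a st fl _ _
  unfold Spec_succ_tuple
  rw [succ_tuple_eq_map]
  simp only [succ_tuple_alt]
  set t : Int := a - (-(PySem.Int.floordiv (-a) 2)) with ht
  clear_value t
  by_cases hR : 0 ≤ t ∧ t < (st.length : Int)
  · rw [if_pos hR]
    conv_rhs => rw [← Int.toNat_of_nonneg hR.1]
    simp only [PySem.List.pySetD_natCast, PySem.List.pyGetD_natCast]
    by_cases hp : PySem.Int.mod a 2 = 0
    · rw [if_pos hp]
      by_cases hz : st.getD t.toNat 0 ≠ 0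
      · rw [if_pos hz]
        apply map_eq_set st t hR.1 hR.2
        · intro dim hd
          have hdt : dim = t.toNat := by omega
          rw [if_pos hd, if_pos hp, hdt, if_pos hz]
        · intro dim hd
          rw [if_neg hd]
      · rw [if_neg hz]
        apply map_eq_self
        intro dim hdl
        by_cases hd : t = (dim : Int)
        · have hdt : dim = t.toNat := by omega
          rw [if_pos hd, if_pos hp, hdt, if_neg hz]
        · rw [if_neg hd]
    · rw [if_neg hp]
      by_cases hz : st.getD t.toNat 0 ≠ fl.getD t.toNat 0
      · rw [if_pos hz]
        apply map_eq_set st t hR.1 hR.2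
        · intro dim hd
          have hdt : dim = t.toNat := by omega
          rw [if_pos hd, if_neg hp, hdt, if_pos hz]
        · intro dim hd
          rw [if_neg hd]
      · rw [if_neg hz]
        apply map_eq_self
        intro dim hdl
        by_cases hd : t = (dim : Int)
        · have hdt : dim = t.toNat := by omega
          rw [if_pos hd, if_neg hp, hdt, if_neg hz]
        · rw [if_neg hd]
  · rw [if_neg hR]
    simp only [PySem.List.pyGetD_natCast]
    apply map_eq_self
    intro dim hdl
    have hd : ¬ t = (dim : Int) := by omega
    rw [if_neg hd]
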